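-- pv_equiv track=rewrite | github.com/sethc5/soil-microbiome-pipeline-core | scripts/ingest/bulk_download.py | _prefer_amplicon_r1
-- ===== SOURCE A (Python) =====
-- def _prefer_amplicon_r1(fastq_urls: list[str]) -> str | None:
--     """Pick the best R1 URL from a list of FASTQ URLs."""
--     for u in fastq_urls:
--         if "_R1_" in u or "_R1." in u or ".1.fastq" in u:
--             return u
--     # Fallback: first URL that isn't obviously shotgun
--     for u in fastq_urls:
--         if "JGI" not in u and "shotgun" not in u.lower():
--             return u
--     return fastq_urls[0] if fastq_urls else None
-- ===== SOURCE B (Python) =====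
-- def _prefer_amplicon_r1(fastq_urls: list[str]) -> str | None:
--     """Pick the best R1 URL: score every URL and take the argmin (stable min)."""
--     def rank(u: str) -> int:
--         if "_R1_" in u or "_R1." in u or ".1.fastq" in u:
--             return 0
--         if "JGI" not in u and "shotgun" not in u.lower():
--             return 1
--         return 2
--     if not fastq_urls:
--         return None
--     return min(fastq_urls, key=rank)
-- ===== Notes on version B (the rewrite author's own statement) =====
-- stated objective: alternative
-- what changed: Replaces A's staged early-return scans (R1 scan, then non-shotgun scan, then head fallback) by a scoring function rank(u) in {0,1,2} and a single argmin via Python's stable built-in min(key=rank), whose first-minimum tie-breaking reproduces A's priorities.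
import Mathlib
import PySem

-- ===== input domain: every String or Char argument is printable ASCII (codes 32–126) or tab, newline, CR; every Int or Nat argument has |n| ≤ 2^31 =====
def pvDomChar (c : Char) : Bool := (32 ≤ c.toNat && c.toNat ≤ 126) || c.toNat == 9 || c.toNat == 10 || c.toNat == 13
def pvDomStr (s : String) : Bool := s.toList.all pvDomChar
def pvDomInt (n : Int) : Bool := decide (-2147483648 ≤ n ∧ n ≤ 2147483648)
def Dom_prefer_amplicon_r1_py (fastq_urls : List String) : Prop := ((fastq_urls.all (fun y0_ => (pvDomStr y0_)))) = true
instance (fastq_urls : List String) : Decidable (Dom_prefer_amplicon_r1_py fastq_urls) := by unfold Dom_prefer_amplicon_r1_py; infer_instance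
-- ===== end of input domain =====

-- B replaces A's staged early-return scans by a rank-scoring function and one stable argmin (alternative algorithm, same cost).


-- ===== PORT A =====
-- A's first loop condition and second loop condition
def pvIsR1 (u : String) : Bool :=
  PySem.Str.isIn "_R1_" u || PySem.Str.isIn "_R1." u || PySem.Str.isIn ".1.fastq" u

def pvNonShotgun (u : String) : Bool :=
  !PySem.Str.isIn "JGI" u && !PySem.Str.isIn "shotgun" (PySem.Str.lower u)

-- first loop: return the first R1-looking URL
def pvAloop1 : List String → Option String
  | [] => none
  | u :: rest => if pvIsR1 u then some u else pvAloop1 rest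

-- second loop: first URL that isn't obviously shotgun
def pvAloop2 : List String → Option String
  | [] => none
  | u :: rest => if pvNonShotgun u then some u else pvAloop2 rest

def prefer_amplicon_r1_py (fastq_urls : List String) : Option String :=
  match pvAloop1 fastq_urls with
  | some u => some u
  | none =>
    match pvAloop2 fastq_urls with
    | some u => some u
    | none => match fastq_urls with
      | [] => none
      | u :: _ => some u

-- ===== PORT B =====
-- B's rank: 0 = R1 match, 1 = non-shotgun, 2 = other
def pvRank (u : String) : Int :=
  if pvIsR1 u then 0 else if pvNonShotgun u then 1 else 2

-- min(fastq_urls, key=rank) — Python's min is stable (first minimal element) = PySem.List.min?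
def prefer_amplicon_r1_py_alt (fastq_urls : List String) : Option String :=
  if fastq_urls.isEmpty then none
  else PySem.List.min? fastq_urls pvRank

-- ===== PRECONDITION & SPEC =====
def Spec_prefer_amplicon_r1_py (fastq_urls : List String) (out : Option String) : Prop := out = prefer_amplicon_r1_py_alt fastq_urls
instance (fastq_urls : List String) (out : Option String) : Decidable (Spec_prefer_amplicon_r1_py fastq_urls out) := by unfold Spec_prefer_amplicon_r1_py; infer_instance

-- ===== CLAIM (what is proved, stated in full; the proofs are below) =====
def Claim_equal_prefer_amplicon_r1_py : Prop := ∀ (fastq_urls : List String), Dom_prefer_amplicon_r1_py fastq_urls → Spec_prefer_amplicon_r1_py fastq_urls (prefer_amplicon_r1_py fastq_urls)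

-- ===== LEMMAS AND PROOFS =====

-- the step function of min?'s fold, specialised to pvRank
def pvMinStep (acc : Option String) (x : String) : Option String :=
  match acc with
  | none => some x
  | some m => if pvRank x < pvRank m then some x else some m

-- invariant of the argmin fold once the accumulator holds m: the result is m if m is
-- already rank 0; otherwise the first rank-0 element of the rest beats it; otherwise m
-- if rank 1; otherwise the first non-shotgun element of the rest; otherwise m.
theorem pvMin_fold_char (l : List String) (m : String) :
    l.foldl pvMinStep (some m) =
      some (if pvIsR1 m then m
            else match pvAloop1 l with
            | some u => u
            | none =>
              if pvNonShotgun m then m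
              else match pvAloop2 l with
                   | some u => u
                   | none => m) := by
  induction l generalizing m with
  | nil => simp [pvAloop1, pvAloop2]
  | cons u t ih =>
    simp only [List.foldl_cons, pvMinStep, pvAloop1, pvAloop2, pvRank]
    by_cases hm1 : pvIsR1 m <;> by_cases hu1 : pvIsR1 u <;>
      by_cases hm2 : pvNonShotgun m <;> by_cases hu2 : pvNonShotgun u <;>
        simp [hm1, hu1, hm2, hu2, ih, pvRank] <;>
          (first
            | rfl
            | (cases h1 : pvAloop1 t <;> simp [h1] <;>
                cases h2 : pvAloop2 t <;> simp [h2]))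

theorem pvMinStep_eq (xs : List String) :
    PySem.List.min? xs pvRank = xs.foldl pvMinStep none := by
  unfold PySem.List.min?
  congr 1
  funext acc x
  cases acc <;> rfl

-- ===== VERDICT (by name: the statement is the Claim_ definition above) =====
theorem prefer_amplicon_r1_py_spec : Claim_equal_prefer_amplicon_r1_py := by
  intro l _
  show prefer_amplicon_r1_py l = prefer_amplicon_r1_py_alt l
  cases l with
  | nil => rfl
  | cons u t =>
    simp only [prefer_amplicon_r1_py, prefer_amplicon_r1_py_alt, List.isEmpty_cons,
      if_neg Bool.false_ne_true, pvMinStep_eq, List.foldl_cons]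
    have : pvMinStep none u = some u := rfl
    rw [this, pvMin_fold_char t u]
    simp only [pvAloop1, pvAloop2]
    by_cases hu1 : pvIsR1 u <;> by_cases hu2 : pvNonShotgun u <;>
      simp [hu1, hu2] <;>
        (cases h1 : pvAloop1 t <;> simp [h1] <;>
          cases h2 : pvAloop2 t <;> simp [h2])
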